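-- pv_equiv track=rewrite | github.com/jepperich69/ML_entropy | code/rulelist/run_probability_analysis.py | predict_bits
-- ===== SOURCE A (Python) =====
-- from typing import Iterable, Sequence
--
-- def predict_bits(
--     order: Sequence[int],
--     predictions: Sequence[int],
--     default_pred: int,
--     masks: Sequence[int],
--     all_mask: int,
-- ) -> int:
--     remaining = all_mask
--     pred_bits = all_mask if default_pred == 1 else 0
--     for rid, pred in zip(order, predictions):
--         captured = remaining & masks[rid]
--         if pred == 1:
--             pred_bits |= captured
--         else:
--             pred_bits &= ~captured
--         remaining &= ~captured
--     return pred_bits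
-- ===== SOURCE B (Python) =====
-- def predict_bits(order, predictions, default_pred, masks, all_mask):
--     # Reverse pass: no 'remaining' mask; each rule unconditionally overwrites the
--     # bits of its mask (restricted to all_mask); processing in reverse makes the
--     # first rule in order win, matching first-match semantics.
--     pred_bits = all_mask if default_pred == 1 else 0
--     for rid, pred in reversed(list(zip(order, predictions))):
--         m = masks[rid] & all_mask
--         if pred == 1:
--             pred_bits |= m
--         else:
--             pred_bits &= ~m
--     return pred_bits
-- ===== Notes on version B (the rewrite author's own statement) =====
-- stated objective: alternative
-- what changed: B eliminates A's 'remaining' mask and its first-match bookkeeping: it iterates the (rid, pred) pairs in reverse, unconditionally overwriting the bits of masks[rid] & all_mask, so the first rule in order wins by being applied last.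
import Mathlib
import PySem

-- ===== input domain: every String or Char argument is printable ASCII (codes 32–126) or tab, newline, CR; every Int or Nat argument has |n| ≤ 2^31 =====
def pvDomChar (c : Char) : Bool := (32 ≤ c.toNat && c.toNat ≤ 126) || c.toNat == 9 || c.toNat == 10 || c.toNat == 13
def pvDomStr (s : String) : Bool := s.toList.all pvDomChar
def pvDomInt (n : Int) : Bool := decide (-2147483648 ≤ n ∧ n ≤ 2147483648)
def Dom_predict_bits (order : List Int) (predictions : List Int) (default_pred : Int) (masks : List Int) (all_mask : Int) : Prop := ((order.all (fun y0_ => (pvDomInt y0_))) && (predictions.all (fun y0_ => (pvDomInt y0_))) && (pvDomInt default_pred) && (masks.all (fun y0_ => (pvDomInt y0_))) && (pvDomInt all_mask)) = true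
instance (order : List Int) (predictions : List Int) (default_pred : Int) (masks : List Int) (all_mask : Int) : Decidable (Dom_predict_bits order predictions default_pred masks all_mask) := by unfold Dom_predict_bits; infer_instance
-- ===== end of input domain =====

-- B replaces A's forward scan with a 'remaining' mask by a reverse scan that
-- unconditionally overwrites each rule's masked bits (alternative decomposition,
-- same cost); equivalence of the return values is proved below.

-- ===== PORT A =====
-- A's loop over zip(order, predictions), carrying (remaining, pred_bits).
-- masks[rid] is Python indexing (negative wrap): PySem.List.pyGet?; Pre_ makes it hit.
def pvALoop (masks : List Int) : List (Int × Int) → Int → Int → Int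
  | [], _, pred_bits => pred_bits
  | (rid, pred) :: rest, remaining, pred_bits =>
    let captured := PySem.Int.band remaining ((PySem.List.pyGet? masks rid).getD 0)
    let pred_bits' := if pred == 1 then PySem.Int.bor pred_bits captured
                      else PySem.Int.band pred_bits (Int.not captured)
    pvALoop masks rest (PySem.Int.band remaining (Int.not captured)) pred_bits'

def predict_bits (order : List Int) (predictions : List Int) (default_pred : Int) (masks : List Int) (all_mask : Int) : Int :=
  pvALoop masks (order.zip predictions) all_mask (if default_pred == 1 then all_mask else 0)

-- ===== PORT B =====
-- one overwrite step of B's reverse loop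
def pvBStep (masks : List Int) (all_mask : Int) (pred_bits : Int) (rp : Int × Int) : Int :=
  let m := PySem.Int.band ((PySem.List.pyGet? masks rp.1).getD 0) all_mask
  if rp.2 == 1 then PySem.Int.bor pred_bits m else PySem.Int.band pred_bits (Int.not m)

def predict_bits_alt (order : List Int) (predictions : List Int) (default_pred : Int) (masks : List Int) (all_mask : Int) : Int :=
  ((order.zip predictions).reverse).foldl (pvBStep masks all_mask)
    (if default_pred == 1 then all_mask else 0)

-- ===== PRECONDITION & SPEC =====
-- Pre_ excludes exactly the inputs where Python A raises IndexError: some rid in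
-- the zipped prefix of order outside the valid (negative-wrapping) index range of masks.
def Pre_predict_bits (order : List Int) (predictions : List Int) (default_pred : Int) (masks : List Int) (all_mask : Int) : Prop :=
  ∀ p ∈ order.zip predictions, -(masks.length : Int) ≤ p.1 ∧ p.1 < (masks.length : Int)
instance (order : List Int) (predictions : List Int) (default_pred : Int) (masks : List Int) (all_mask : Int) : Decidable (Pre_predict_bits order predictions default_pred masks all_mask) := by unfold Pre_predict_bits; infer_instance

def pvWitness_predict_bits : List Int × List Int × Int × List Int × Int := ([0, -1], [1, 0], 0, [3, 5], 7)

def Spec_predict_bits (order : List Int) (predictions : List Int) (default_pred : Int) (masks : List Int) (all_mask : Int) (out : Int) : Prop := out = predict_bits_alt order predictions default_pred masks all_mask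
instance (order : List Int) (predictions : List Int) (default_pred : Int) (masks : List Int) (all_mask : Int) (out : Int) : Decidable (Spec_predict_bits order predictions default_pred masks all_mask out) := by unfold Spec_predict_bits; infer_instance

-- ===== CLAIM (what is proved, stated in full; the proofs are below) =====
def Claim_equal_predict_bits : Prop := ∀ (order : List Int) (predictions : List Int) (default_pred : Int) (masks : List Int) (all_mask : Int), Dom_predict_bits order predictions default_pred masks all_mask → Pre_predict_bits order predictions default_pred masks all_mask → Spec_predict_bits order predictions default_pred masks all_mask (predict_bits order predictions default_pred masks all_mask)

-- ===== LEMMAS AND PROOFS =====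

theorem pv_and_add_ldiff (m : Nat) : ∀ n : Nat, (m &&& n) + Nat.ldiff m n = m := by
  induction m using Nat.binaryRec with
  | zero =>
    intro n
    have h1 : (0 &&& n) = 0 := by simp
    have h2 : Nat.ldiff 0 n = 0 := Nat.eq_of_testBit_eq (by simp [Nat.testBit_ldiff])
    simp [h1, h2]
  | bit a m ih =>
    intro n
    induction n using Nat.bitCasesOn with
    | bit b n =>
      rw [Nat.land_bit, Nat.ldiff_bit]
      have := ih n
      cases a <;> cases b <;> simp [Nat.bit] <;> omega

theorem pv_ldiff_eq_sub (m n : Nat) : Nat.ldiff m n = m - (m &&& n) := by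
  have := pv_and_add_ldiff m n; omega

theorem pv_band_eq_land (a b : Int) : PySem.Int.band a b = Int.land a b := by
  cases a with
  | ofNat m =>
    cases b with
    | ofNat n => simp [PySem.Int.band, Int.land]
    | negSucc n =>
      have h : (-(Int.negSucc n) - 1).toNat = n := by omega
      unfold PySem.Int.band
      split_ifs <;> try (first | omega | exact absurd (Int.natCast_nonneg _) (by assumption))
      rw [h]
      simp [Int.land, ← pv_ldiff_eq_sub]
  | negSucc m =>
    cases b with
    | ofNat n =>
      have h : (-(Int.negSucc m) - 1).toNat = m := by omega
      unfold PySem.Int.band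
      split_ifs <;> try (first | omega | exact absurd (Int.natCast_nonneg _) (by assumption))
      rw [h]
      simp [Int.land, ← pv_ldiff_eq_sub]
    | negSucc n =>
      have hm : (-(Int.negSucc m) - 1).toNat = m := by omega
      have hn : (-(Int.negSucc n) - 1).toNat = n := by omega
      unfold PySem.Int.band
      split_ifs <;> try (first | omega | exact absurd (Int.natCast_nonneg _) (by assumption))
      rw [hm, hn]
      simp [Int.land, Int.negSucc_eq]
      omega

theorem pv_bor_eq_lor (a b : Int) : PySem.Int.bor a b = Int.lor a b := by
  cases a with
  | ofNat m =>
    cases b with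
    | ofNat n => simp [PySem.Int.bor, Int.lor]
    | negSucc n =>
      have h : (-(Int.negSucc n) - 1).toNat = n := by omega
      unfold PySem.Int.bor
      split_ifs <;> try (first | omega | exact absurd (Int.natCast_nonneg _) (by assumption))
      rw [h]
      simp [Int.lor, Int.negSucc_eq, ← pv_ldiff_eq_sub]
      omega
  | negSucc m =>
    have hm : (-(Int.negSucc m) - 1).toNat = m := by omega
    cases b with
    | ofNat n =>
      unfold PySem.Int.bor
      split_ifs <;> try (first | omega | exact absurd (Int.natCast_nonneg _) (by assumption))
      rw [hm]
      simp [Int.lor, Int.negSucc_eq, ← pv_ldiff_eq_sub]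
      omega
    | negSucc n =>
      have hn : (-(Int.negSucc n) - 1).toNat = n := by omega
      unfold PySem.Int.bor
      split_ifs <;> try (first | omega | exact absurd (Int.natCast_nonneg _) (by assumption))
      rw [hm, hn]
      simp [Int.lor, Int.negSucc_eq]
      omega

theorem pv_not_eq_lnot (a : Int) : Int.not a = Int.lnot a := by
  cases a <;> rfl

@[simp] theorem pv_tb_band (a b : Int) (k : Nat) :
    (PySem.Int.band a b).testBit k = (a.testBit k && b.testBit k) := by
  rw [pv_band_eq_land, Int.testBit_land]

@[simp] theorem pv_tb_bor (a b : Int) (k : Nat) :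
    (PySem.Int.bor a b).testBit k = (a.testBit k || b.testBit k) := by
  rw [pv_bor_eq_lor, Int.testBit_lor]

@[simp] theorem pv_tb_not (a : Int) (k : Nat) :
    (Int.not a).testBit k = !(a.testBit k) := by
  rw [pv_not_eq_lnot, Int.testBit_lnot]

-- extensionality of Int by bits
theorem pv_int_ext {a b : Int} (h : ∀ k, a.testBit k = b.testBit k) : a = b := by
  cases a with
  | ofNat m =>
    cases b with
    | ofNat n =>
      have : m = n := Nat.eq_of_testBit_eq (fun k => by
        have := h k; simpa [Int.testBit] using this)
      simp [this]
    | negSucc n =>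
      exfalso
      have hk := h (m + n)
      have h1 : Nat.testBit m (m + n) = false :=
        Nat.testBit_lt_two_pow (lt_of_le_of_lt (Nat.le_add_right m n) Nat.lt_two_pow_self)
      have h2 : Nat.testBit n (m + n) = false :=
        Nat.testBit_lt_two_pow (lt_of_le_of_lt (Nat.le_add_left n m) Nat.lt_two_pow_self)
      simp [Int.testBit, h1, h2] at hk
  | negSucc m =>
    cases b with
    | ofNat n =>
      exfalso
      have hk := h (m + n)
      have h1 : Nat.testBit m (m + n) = false :=
        Nat.testBit_lt_two_pow (lt_of_le_of_lt (Nat.le_add_right m n) Nat.lt_two_pow_self)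
      have h2 : Nat.testBit n (m + n) = false :=
        Nat.testBit_lt_two_pow (lt_of_le_of_lt (Nat.le_add_left n m) Nat.lt_two_pow_self)
      simp [Int.testBit, h1, h2] at hk
    | negSucc n =>
      have : m = n := Nat.eq_of_testBit_eq (fun k => by
        have := h k
        simp only [Int.testBit] at this
        exact Bool.not_inj this)
      simp [this]

-- B's reverse foldl, rewritten as a foldr (first pair applied last = outermost)
def pvBRes (masks : List Int) (all_mask : Int) (l : List (Int × Int)) (pb : Int) : Int :=
  l.foldr (fun rp acc => pvBStep masks all_mask acc rp) pb

theorem pv_alt_eq_res (order predictions : List Int) (default_pred : Int) (masks : List Int) (all_mask : Int) :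
    predict_bits_alt order predictions default_pred masks all_mask
      = pvBRes masks all_mask (order.zip predictions) (if default_pred == 1 then all_mask else 0) := by
  unfold predict_bits_alt pvBRes
  rw [List.foldl_reverse]

-- bit k of one overwrite step
theorem pv_tb_step (masks : List Int) (all_mask : Int) (pb : Int) (rp : Int × Int) (k : Nat) :
    (pvBStep masks all_mask pb rp).testBit k
      = (if rp.2 == 1 then pb.testBit k || (((PySem.List.pyGet? masks rp.1).getD 0).testBit k && all_mask.testBit k)
         else pb.testBit k && !(((PySem.List.pyGet? masks rp.1).getD 0).testBit k && all_mask.testBit k)) := by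
  unfold pvBStep
  split <;> simp

-- bit k of pvBRes depends on the base only through bit k of the base
theorem pv_res_congr (masks : List Int) (all_mask : Int) (l : List (Int × Int)) :
    ∀ (x y : Int) (k : Nat), x.testBit k = y.testBit k →
      (pvBRes masks all_mask l x).testBit k = (pvBRes masks all_mask l y).testBit k := by
  induction l with
  | nil => intro x y k h; simpa [pvBRes] using h
  | cons p t ih =>
    intro x y k h
    have hrec := ih x y k h
    simp only [pvBRes, List.foldr_cons] at *
    rw [pv_tb_step, pv_tb_step, hrec]

-- bits outside all_mask are never touched by pvBRes
theorem pv_res_frozen (masks : List Int) (all_mask : Int) (l : List (Int × Int)) (pb : Int) (k : Nat)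
    (h : all_mask.testBit k = false) :
    (pvBRes masks all_mask l pb).testBit k = pb.testBit k := by
  induction l with
  | nil => rfl
  | cons p t ih =>
    simp only [pvBRes, List.foldr_cons] at *
    rw [pv_tb_step, ih]
    split <;> simp [h]

-- the loop invariant: bits still in 'remaining' follow B's overwrite result, others are frozen
theorem pv_key (masks : List Int) (all_mask : Int) :
    ∀ (l : List (Int × Int)) (pb remaining : Int)
      (h : ∀ k, remaining.testBit k = true → all_mask.testBit k = true) (k : Nat),
      (pvALoop masks l remaining pb).testBit k
        = if remaining.testBit k then (pvBRes masks all_mask l pb).testBit k else pb.testBit k := by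
  intro l
  induction l with
  | nil => intro pb remaining h k; simp [pvALoop, pvBRes]
  | cons p t ih =>
    intro pb remaining h k
    obtain ⟨rid, pred⟩ := p
    simp only [pvALoop]
    set mA := (PySem.List.pyGet? masks rid).getD 0 with hmA
    have h' : ∀ k', (PySem.Int.band remaining (Int.not (PySem.Int.band remaining mA))).testBit k' = true →
        all_mask.testBit k' = true := by
      intro k' hk'
      apply h k'
      simp at hk'
      exact hk'.1
    rw [ih _ _ h' k]
    simp only [pvBRes, List.foldr_cons]
    rw [pv_tb_step]
    by_cases hr : remaining.testBit k
    · have hrt := h k hr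
      rw [if_pos hr]
      by_cases hm : mA.testBit k
      · -- captured at this step: the bit leaves 'remaining'; both sides give pred's value
        rw [if_neg (show ¬ (PySem.Int.band remaining (Int.not (PySem.Int.band remaining mA))).testBit k = true by
          simp [hr, hm, ← hmA])]
        split <;> rename_i hp <;> simp [hp, hr, hm, hrt, ← hmA]
      · -- not captured: the bit stays in 'remaining' and pb is unchanged at k
        rw [if_pos (show (PySem.Int.band remaining (Int.not (PySem.Int.band remaining mA))).testBit k = true by
          simp [hr, hm, ← hmA])]
        have hx : ∀ pb' : Int, pb'.testBit k = pb.testBit k →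
            (List.foldr (fun rp acc => pvBStep masks all_mask acc rp) pb' t).testBit k
              = (List.foldr (fun rp acc => pvBStep masks all_mask acc rp) pb t).testBit k := by
          intro pb' hpb'
          have := pv_res_congr masks all_mask t pb' pb k hpb'
          simpa [pvBRes] using this
        split <;> rename_i hp
        · rw [hx (PySem.Int.bor pb (PySem.Int.band remaining mA)) (by simp [hm, ← hmA])]
          simp [hp, hm, ← hmA]
        · rw [hx (PySem.Int.band pb (Int.not (PySem.Int.band remaining mA))) (by simp [hm, ← hmA])]
          simp [hp, hm, ← hmA]
    · -- bit not in remaining: frozen on both sides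
      rw [if_neg hr, if_neg (show ¬ (PySem.Int.band remaining (Int.not (PySem.Int.band remaining mA))).testBit k = true by
        simp [hr, ← hmA])]
      split <;> rename_i hp <;> simp [hp, hr, ← hmA]

-- ===== VERDICT (by name: the statement is the Claim_ definition above) =====
theorem predict_bits_spec : Claim_equal_predict_bits := by
  intro order predictions default_pred masks all_mask _hDom _hPre
  unfold Spec_predict_bits
  apply pv_int_ext
  intro k
  rw [pv_alt_eq_res]
  unfold predict_bits
  rw [pv_key masks all_mask (order.zip predictions) _ all_mask (fun _ hk => hk) k]
  by_cases hk : all_mask.testBit k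
  · simp [hk]
  · rw [pv_res_frozen masks all_mask _ _ k (by simpa using hk)]
    simp [hk]
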